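-- pv_equiv track=rewrite | github.com/Antoo22D/Exercisce_Python_UNIVERSITY | R2.py | ricorsione2
-- ===== SOURCE A (Python) =====
-- def ricorsione2(l,j):
--     if len(l)%2!=0:
--         return False
--     else:
--         if j<len(l)//2:
--             if l[j]==l[(len(l)//2)+j]:
--                 return ricorsione2(l, j+1)
--             else:
--                 return False
--         return True
-- ===== SOURCE B (Python) =====
-- def ricorsione2(l, j):
--     if len(l) % 2 != 0:
--         return False
--     half = len(l) // 2
--     return all(l[i] == l[half + i] for i in range(j, half))
-- ===== Notes on version B (the rewrite author's own statement) =====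
-- stated objective: simpler
-- what changed: Replaced the tail recursion on j with a single all(...) over range(j, half), keeping the exact indexing expressions l[i] and l[half+i].
-- outside the precondition, e.g. on ricorsione2([1, 2], -5): A raises IndexError, B raises IndexError
import Mathlib
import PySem

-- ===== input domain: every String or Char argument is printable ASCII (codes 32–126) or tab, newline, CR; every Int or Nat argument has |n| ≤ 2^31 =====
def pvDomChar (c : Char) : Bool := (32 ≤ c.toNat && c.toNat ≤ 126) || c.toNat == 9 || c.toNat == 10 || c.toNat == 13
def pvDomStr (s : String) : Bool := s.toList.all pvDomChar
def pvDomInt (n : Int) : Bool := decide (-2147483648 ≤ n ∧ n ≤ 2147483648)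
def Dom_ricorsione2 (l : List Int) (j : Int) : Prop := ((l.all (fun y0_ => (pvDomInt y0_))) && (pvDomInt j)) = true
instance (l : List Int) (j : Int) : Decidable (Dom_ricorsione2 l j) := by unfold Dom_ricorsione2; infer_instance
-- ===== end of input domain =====

-- B replaces A's tail recursion on j with a single all(...) over range(j, half) using the same index expressions (objective: simpler).
-- Pre_ excludes inputs where Python A raises IndexError (an index below -len(l) is reached); B raises there too.


-- ===== PORT A =====
def ricorsione2 (l : List Int) (j : Int) : Bool :=
  if (l.length : Int) % 2 ≠ 0 then false
  else if _h : j < (l.length : Int) / 2 then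
    if PySem.List.pyGet? l j = PySem.List.pyGet? l ((l.length : Int) / 2 + j) then
      ricorsione2 l (j + 1)
    else false
  else true
termination_by ((l.length : Int) / 2 - j).toNat
decreasing_by omega

-- ===== PORT B =====
def ricorsione2_alt (l : List Int) (j : Int) : Bool :=
  if (l.length : Int) % 2 ≠ 0 then false
  else
    (PySem.List.pyRange j ((l.length : Int) / 2) 1).all
      (fun i => PySem.List.pyGet? l i == PySem.List.pyGet? l ((l.length : Int) / 2 + i))

-- ===== PRECONDITION & SPEC =====
-- Pre_ excludes exactly the inputs where Python A raises IndexError: even length, j < half, and j < -len(l).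
def Pre_ricorsione2 (l : List Int) (j : Int) : Prop :=
  ((l.length : Int) % 2 = 0 ∧ j < (l.length : Int) / 2) → -(l.length : Int) ≤ j
instance (l : List Int) (j : Int) : Decidable (Pre_ricorsione2 l j) := by unfold Pre_ricorsione2; infer_instance
def pvWitness_ricorsione2 : List Int × Int := ([1, 2, 1, 2], 0)
def Spec_ricorsione2 (l : List Int) (j : Int) (out : Bool) : Prop := out = ricorsione2_alt l j
instance (l : List Int) (j : Int) (out : Bool) : Decidable (Spec_ricorsione2 l j out) := by unfold Spec_ricorsione2; infer_instance

-- ===== CLAIM (what is proved, stated in full; the proofs are below) =====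
def Claim_equal_ricorsione2 : Prop := ∀ (l : List Int) (j : Int), Dom_ricorsione2 l j → Pre_ricorsione2 l j → Spec_ricorsione2 l j (ricorsione2 l j)

-- ===== LEMMAS AND PROOFS =====
theorem ricorsione2_agree (l : List Int) (j : Int) : ricorsione2 l j = ricorsione2_alt l j := by
  by_cases hlen : (l.length : Int) % 2 ≠ 0
  · rw [ricorsione2, ricorsione2_alt, if_pos hlen, if_pos hlen]
  · suffices H : ∀ (n : Nat) (j : Int), ((l.length : Int) / 2 - j).toNat = n →
        ricorsione2 l j = ricorsione2_alt l j from H _ j rfl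
    intro n
    induction n with
    | zero =>
        intro j hj
        rw [ricorsione2, ricorsione2_alt, if_neg hlen, if_neg hlen, dif_neg (by omega : ¬ j < (l.length : Int) / 2)]
        rw [PySem.List.pyRange_one_eq_nil (by omega)]
        simp
    | succ n ih =>
        intro j hj
        have hj2 : j < (l.length : Int) / 2 := by omega
        rw [ricorsione2, ricorsione2_alt, if_neg hlen, if_neg hlen, dif_pos hj2]
        rw [PySem.List.pyRange_one_cons hj2, List.all_cons]
        by_cases heq : PySem.List.pyGet? l j = PySem.List.pyGet? l ((l.length : Int) / 2 + j)
        · rw [if_pos heq, ih (j + 1) (by omega), ricorsione2_alt, if_neg hlen]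
          simp [heq]
        · rw [if_neg heq]
          simp [heq]

-- ===== VERDICT (by name: the statement is the Claim_ definition above) =====
theorem ricorsione2_spec : Claim_equal_ricorsione2 := by
  intro l j _ _
  unfold Spec_ricorsione2
  exact ricorsione2_agree l j
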